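-- pv_equiv track=rewrite | github.com/NicholasAntoniadesEngineer/llm_game | orchestration/engine_build_loop.py | sort_wave_plan_open_terrain_first
-- ===== SOURCE A (Python) =====
-- def sort_wave_plan_open_terrain_first(master_plan: list, open_terrain_types: frozenset) -> list:
--     """Deterministic order: procedural open-terrain structures first, then others (stable within each group)."""
--     procedural: list = []
--     rest: list = []
--     for struct in master_plan:
--         if struct.get("building_type", "") in open_terrain_types:
--             procedural.append(struct)
--         else:
--             rest.append(struct)
--     return procedural + rest
-- ===== SOURCE B (Python) =====
-- def sort_wave_plan_open_terrain_first(master_plan: list, open_terrain_types: frozenset) -> list: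
--     """Deterministic order: procedural open-terrain structures first, then others (stable within each group)."""
--     return sorted(master_plan, key=lambda s: s.get("building_type", "") not in open_terrain_types)
-- ===== Notes on version B (the rewrite author's own statement) =====
-- stated objective: idiomatic
-- what changed: Replaces the explicit two-list partition-and-concatenate loop with a single stable sort on the boolean key 'building_type not in open_terrain_types', which puts open-terrain structures first and preserves relative order within each group.
import Mathlib
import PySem

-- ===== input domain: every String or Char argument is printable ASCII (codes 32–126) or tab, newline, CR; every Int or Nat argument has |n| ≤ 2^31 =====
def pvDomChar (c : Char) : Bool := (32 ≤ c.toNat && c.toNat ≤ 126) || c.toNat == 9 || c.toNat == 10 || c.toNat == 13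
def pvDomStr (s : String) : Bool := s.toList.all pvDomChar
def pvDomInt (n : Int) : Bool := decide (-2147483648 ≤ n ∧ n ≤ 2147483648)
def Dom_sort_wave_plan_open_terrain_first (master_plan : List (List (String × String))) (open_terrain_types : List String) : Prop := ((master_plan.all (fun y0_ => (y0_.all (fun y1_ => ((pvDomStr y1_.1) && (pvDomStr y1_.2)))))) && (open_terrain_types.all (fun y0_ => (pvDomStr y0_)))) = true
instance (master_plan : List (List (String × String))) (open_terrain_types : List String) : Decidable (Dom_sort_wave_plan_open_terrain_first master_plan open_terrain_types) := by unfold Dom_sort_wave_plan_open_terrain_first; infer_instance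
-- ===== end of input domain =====

-- B replaces A's explicit partition-and-concatenate loop with one stable sort on a boolean key (idiomatic; same return value, neither mutates its input).

-- ===== PORT A =====
-- A: one pass appending each struct to `procedural` or `rest`, then procedural + rest.
def sort_wave_plan_open_terrain_first (master_plan : List (List (String × String))) (open_terrain_types : List String) : List (List (String × String)) :=
  let acc := master_plan.foldl
    (fun (acc : List (List (String × String)) × List (List (String × String))) struct =>
      if open_terrain_types.contains (PySem.Dict.getD ⟨struct⟩ "building_type" "") then
        (acc.1 ++ [struct], acc.2)
      else
        (acc.1, acc.2 ++ [struct]))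
    ([], [])
  acc.1 ++ acc.2

-- ===== PORT B =====
-- B: sorted(master_plan, key=lambda s: s.get("building_type","") not in open_terrain_types)
def sort_wave_plan_open_terrain_first_alt (master_plan : List (List (String × String))) (open_terrain_types : List String) : List (List (String × String)) :=
  PySem.List.sorted master_plan
    (fun s => !(open_terrain_types.contains (PySem.Dict.getD ⟨s⟩ "building_type" ""))) false

-- ===== PRECONDITION & SPEC =====
def Spec_sort_wave_plan_open_terrain_first (master_plan : List (List (String × String))) (open_terrain_types : List String) (out : List (List (String × String))) : Prop := out = sort_wave_plan_open_terrain_first_alt master_plan open_terrain_types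
instance (master_plan : List (List (String × String))) (open_terrain_types : List String) (out : List (List (String × String))) : Decidable (Spec_sort_wave_plan_open_terrain_first master_plan open_terrain_types out) := by unfold Spec_sort_wave_plan_open_terrain_first; infer_instance

-- ===== CLAIM (what is proved, stated in full; the proofs are below) =====
def Claim_equal_sort_wave_plan_open_terrain_first : Prop := ∀ (master_plan : List (List (String × String))) (open_terrain_types : List String), Dom_sort_wave_plan_open_terrain_first master_plan open_terrain_types → Spec_sort_wave_plan_open_terrain_first master_plan open_terrain_types (sort_wave_plan_open_terrain_first master_plan open_terrain_types)

-- ===== LEMMAS AND PROOFS =====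

-- Inserting x into P ++ R where every element of P has key false and every element of R has key true:
-- x lands at the end of its own key-group (this is exactly insertion-sort stability for a Bool key).
theorem insertBy_partition {α : Type} (key : α → Bool) (x : α) :
    ∀ (P R : List α), (∀ p ∈ P, key p = false) → (∀ r ∈ R, key r = true) →
    PySem.List.insertBy (fun a b => decide (key a < key b)) x (P ++ R) =
      if key x then P ++ R ++ [x] else P ++ x :: R := by
  intro P
  induction P with
  | nil =>
    intro R _ hR
    induction R with
    | nil => cases hx : key x <;> simp [PySem.List.insertBy]
    | cons r rs ih =>
      have hr : key r = true := hR r (by simp)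
      have hrs : ∀ r' ∈ rs, key r' = true := fun r' h => hR r' (by simp [h])
      cases hx : key x with
      | false => simp [PySem.List.insertBy, hr, hx]
      | true =>
        have := ih hrs
        simp only [hx, List.nil_append] at this ⊢
        simp [PySem.List.insertBy, hr, hx, this]
  | cons p ps ih =>
    intro R hP hR
    have hp : key p = false := hP p (by simp)
    have hps : ∀ p' ∈ ps, key p' = false := fun p' h => hP p' (by simp [h])
    have := ih R hps hR
    cases hx : key x <;>
      simp_all [PySem.List.insertBy]

-- The insertion-sort fold keeps the accumulator partitioned: starting from P ++ R it produces
-- P ++ (key-false elements of xs, in order) followed by R ++ (key-true elements of xs, in order).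
theorem foldl_insertBy_partition {α : Type} (key : α → Bool) :
    ∀ (xs P R : List α), (∀ p ∈ P, key p = false) → (∀ r ∈ R, key r = true) →
    xs.foldl (fun acc x => PySem.List.insertBy (fun a b => decide (key a < key b)) x acc) (P ++ R) =
      (P ++ xs.filter (fun x => !key x)) ++ (R ++ xs.filter key) := by
  intro xs
  induction xs with
  | nil => intro P R _ _; simp
  | cons x xs ih =>
    intro P R hP hR
    rw [List.foldl_cons, insertBy_partition key x P R hP hR]
    by_cases hx : key x = true
    · have h1 : ∀ r ∈ R ++ [x], key r = true := by
        intro r hr; rcases List.mem_append.mp hr with h | h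
        · exact hR r h
        · simp_all
      rw [if_pos hx, show P ++ R ++ [x] = P ++ (R ++ [x]) by simp,
        ih P (R ++ [x]) hP h1]
      simp [hx]
    · have h1 : ∀ p ∈ P ++ [x], key p = false := by
        intro p hp; rcases List.mem_append.mp hp with h | h
        · exact hP p h
        · simp_all
      rw [if_neg hx, show P ++ x :: R = (P ++ [x]) ++ R by simp,
        ih (P ++ [x]) R h1 hR]
      simp [hx]

-- A's two-accumulator fold computes the two filters.
theorem foldA_filter (open_terrain_types : List String) :
    ∀ (xs : List (List (String × String)))
      (P R : List (List (String × String))),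
    xs.foldl
      (fun (acc : List (List (String × String)) × List (List (String × String))) struct =>
        if open_terrain_types.contains (PySem.Dict.getD ⟨struct⟩ "building_type" "") then
          (acc.1 ++ [struct], acc.2)
        else
          (acc.1, acc.2 ++ [struct])) (P, R) =
      (P ++ xs.filter (fun s => open_terrain_types.contains (PySem.Dict.getD ⟨s⟩ "building_type" "")),
       R ++ xs.filter (fun s => !(open_terrain_types.contains (PySem.Dict.getD ⟨s⟩ "building_type" "")))) := by
  intro xs
  induction xs with
  | nil => intro P R; simp
  | cons x xs ih =>
    intro P R
    rw [List.foldl_cons]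
    by_cases hx : open_terrain_types.contains (PySem.Dict.getD ⟨x⟩ "building_type" "") = true
    · rw [if_pos hx, ih (P ++ [x]) R]
      simp only [List.contains_iff_mem] at hx
      simp [hx]
    · rw [if_neg hx, ih P (R ++ [x])]
      simp only [List.contains_iff_mem] at hx
      simp [hx]

-- ===== VERDICT (by name: the statement is the Claim_ definition above) =====
theorem sort_wave_plan_open_terrain_first_spec : Claim_equal_sort_wave_plan_open_terrain_first := by
  intro master_plan open_terrain_types _
  unfold Spec_sort_wave_plan_open_terrain_first
  unfold sort_wave_plan_open_terrain_first sort_wave_plan_open_terrain_first_alt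
  set key : List (String × String) → Bool :=
    fun s => !(open_terrain_types.contains (PySem.Dict.getD ⟨s⟩ "building_type" "")) with hkey
  have hB : PySem.List.sorted master_plan key false =
      ([] ++ master_plan.filter (fun x => !key x)) ++ ([] ++ master_plan.filter key) := by
    simpa [PySem.List.sorted] using
      foldl_insertBy_partition key master_plan [] [] (by simp) (by simp)
  rw [hB, foldA_filter]
  simp [hkey]
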